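-- pv_equiv track=rewrite | github.com/hhhhzzzj/feishu-knowledge-agent | backend/reconciliation/service.py | _split_table_sections
-- ===== SOURCE A (Python) =====
-- def _split_table_sections(markdown: str) -> list[str]:
--     sections: list[str] = []
--     current: list[str] = []
--     in_table = False
--     for line in markdown.splitlines():
--         stripped = line.strip()
--         if stripped.startswith("|") and "|" in stripped[1:]:
--             if not in_table:
--                 if current:
--                     sections.append("\n".join(current))
--                     current = []
--                 in_table = True
--             current.append(line)
--         else:
--             if in_table:
--                 in_table = False
--                 if current:
--                     sections.append("\n".join(current))
--                     current = []
--             current.append(line)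
--     if current:
--         remaining = "\n".join(current)
--         if "|" in remaining:
--             sections.append(remaining)
--     return sections
-- ===== SOURCE B (Python) =====
-- def _is_table(line: str) -> bool:
--     stripped = line.strip()
--     return stripped.startswith("|") and "|" in stripped[1:]
--
--
-- def _split_table_sections(markdown: str) -> list[str]:
--     # Scan maximal runs of same-category lines with two indices, join each run,
--     # then drop the final run unless it contains a '|'.
--     lines = markdown.splitlines()
--     sections = []
--     i, n = 0, len(lines)
--     while i < n:
--         j = i + 1
--         while j < n and _is_table(lines[j]) == _is_table(lines[i]):
--             j += 1
--         sections.append("\n".join(lines[i:j]))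
--         i = j
--     if sections and "|" not in sections[-1]:
--         sections.pop()
--     return sections
-- ===== Notes on version B (the rewrite author's own statement) =====
-- stated objective: simpler
-- what changed: Replaced A's stateful sections/current/in_table accumulator loop by a two-index scan that joins maximal same-category runs directly and then conditionally pops the last run.
import Mathlib
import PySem

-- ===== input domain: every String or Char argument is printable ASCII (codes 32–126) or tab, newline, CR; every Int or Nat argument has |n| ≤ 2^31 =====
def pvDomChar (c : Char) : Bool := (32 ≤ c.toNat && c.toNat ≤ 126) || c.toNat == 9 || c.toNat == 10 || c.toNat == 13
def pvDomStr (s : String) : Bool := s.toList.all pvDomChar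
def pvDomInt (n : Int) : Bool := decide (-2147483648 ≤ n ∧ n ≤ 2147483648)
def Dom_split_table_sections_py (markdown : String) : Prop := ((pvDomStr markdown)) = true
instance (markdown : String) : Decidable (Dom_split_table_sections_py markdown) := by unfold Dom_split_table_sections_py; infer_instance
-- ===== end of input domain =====

-- B replaces A's stateful sections/current/in_table accumulation by a two-index scan over
-- maximal same-category runs followed by one conditional pop of the last run (objective: simpler).

-- ===== PORT A =====
-- shared predicate: stripped.startswith("|") and "|" in stripped[1:]  (identical code in A and B)
def pvIsTable (line : String) : Bool :=
  let stripped := PySem.Str.strip line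
  PySem.Str.startswith stripped "|" && PySem.Str.isIn "|" (PySem.Str.slice stripped (some 1) none)

-- one iteration of A's for-loop over state (sections, current, in_table)
def pvAStep (st : List String × List String × Bool) (line : String) :
    List String × List String × Bool :=
  let sections := st.1
  let current := st.2.1
  let in_table := st.2.2
  if pvIsTable line then
    if !in_table then
      if !current.isEmpty then
        (sections ++ [PySem.Str.join "\n" current], [line], true)
      else (sections, current ++ [line], true)
    else (sections, current ++ [line], true)
  else
    if in_table then
      if !current.isEmpty then
        (sections ++ [PySem.Str.join "\n" current], [line], false)
      else (sections, current ++ [line], false)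
    else (sections, current ++ [line], false)

-- A's trailing block: if current: remaining = join(current); if "|" in remaining: append
def pvAFinalize (st : List String × List String × Bool) : List String :=
  let sections := st.1
  let current := st.2.1
  if !current.isEmpty then
    let remaining := PySem.Str.join "\n" current
    if PySem.Str.isIn "|" remaining then sections ++ [remaining] else sections
  else sections

def split_table_sections_py (markdown : String) : List String :=
  pvAFinalize ((PySem.Str.splitlines markdown).foldl pvAStep ([], [], false))

-- ===== PORT B =====
-- B's outer while loop over indices i < j: each step takes the maximal run of lines with the
-- same pvIsTable value as lines[i] (the inner while / lines[i:j]) and recurses on lines[j:].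
def pvRuns (lines : List String) : List String :=
  match lines with
  | [] => []
  | x :: xs =>
    PySem.Str.join "\n" (x :: xs.takeWhile (fun y => pvIsTable y == pvIsTable x))
      :: pvRuns (xs.dropWhile (fun y => pvIsTable y == pvIsTable x))
termination_by lines.length
decreasing_by
  simpa using Nat.lt_succ_of_le (List.Sublist.length_le (List.dropWhile_sublist _))

def split_table_sections_py_alt (markdown : String) : List String :=
  let sections := pvRuns (PySem.Str.splitlines markdown)
  -- if sections and "|" not in sections[-1]: sections.pop()
  if !sections.isEmpty && !(PySem.Str.isIn "|" (sections.getLastD "")) then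
    sections.dropLast
  else sections

-- ===== PRECONDITION & SPEC =====
def Spec_split_table_sections_py (markdown : String) (out : List String) : Prop := out = split_table_sections_py_alt markdown
instance (markdown : String) (out : List String) : Decidable (Spec_split_table_sections_py markdown out) := by unfold Spec_split_table_sections_py; infer_instance

-- ===== CLAIM (what is proved, stated in full; the proofs are below) =====
def Claim_equal_split_table_sections_py : Prop := ∀ (markdown : String), Dom_split_table_sections_py markdown → Spec_split_table_sections_py markdown (split_table_sections_py markdown)

-- ===== LEMMAS AND PROOFS =====

lemma pvRuns_nil : pvRuns [] = [] := by rw [pvRuns.eq_def]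

lemma pvRuns_cons (x : String) (xs : List String) :
    pvRuns (x :: xs) =
      PySem.Str.join "\n" (x :: xs.takeWhile (fun y => pvIsTable y == pvIsTable x))
        :: pvRuns (xs.dropWhile (fun y => pvIsTable y == pvIsTable x)) := by
  rw [pvRuns.eq_def]

-- "keep every run except possibly the last; keep the last iff it contains '|'"
def pvEmitLast : List String → List String
  | [] => []
  | [s] => if PySem.Str.isIn "|" s then [s] else []
  | s :: t :: rest => s :: pvEmitLast (t :: rest)

lemma pvAlt_eq_emitLast (rs : List String) :
    (if !rs.isEmpty && !(PySem.Str.isIn "|" (rs.getLastD "")) then rs.dropLast else rs)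
      = pvEmitLast rs := by
  induction rs with
  | nil => simp [pvEmitLast]
  | cons s t ih =>
    cases t with
    | nil => simp only [pvEmitLast]; split <;> simp_all
    | cons u v =>
      simp only [pvEmitLast, ← ih]
      cases h : PySem.Str.isIn "|" ((u :: v).getLastD "") <;> simp_all

-- runs of lines when a nonempty current run with category b is already open
def pvRunsC (c : List String) (b : Bool) (lines : List String) : List String :=
  PySem.Str.join "\n" (c ++ lines.takeWhile (fun y => pvIsTable y == b))
    :: pvRuns (lines.dropWhile (fun y => pvIsTable y == b))

lemma pvLoop (lines : List String) (S c : List String) (b : Bool) (hc : c ≠ []) :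
    pvAFinalize (lines.foldl pvAStep (S, c, b)) = S ++ pvEmitLast (pvRunsC c b lines) := by
  induction lines generalizing S c b with
  | nil =>
    simp only [List.foldl_nil, pvRunsC, List.takeWhile_nil, List.dropWhile_nil, List.append_nil,
      pvRuns_nil]
    simp only [pvAFinalize, pvEmitLast]
    split <;> split <;> simp_all
  | cons x xs ih =>
    by_cases hxb : pvIsTable x = b
    · have hstep : pvAStep (S, c, b) x = (S, c ++ [x], b) := by
        cases b <;> simp_all [pvAStep]
      have hruns : pvRunsC c b (x :: xs) = pvRunsC (c ++ [x]) b xs := by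
        simp [pvRunsC, hxb, List.append_assoc]
      rw [List.foldl_cons, hstep, ih _ (c ++ [x]) b (by simp), hruns]
    · have hstep : pvAStep (S, c, b) x = (S ++ [PySem.Str.join "\n" c], [x], pvIsTable x) := by
        cases b <;> cases hx : pvIsTable x <;> simp_all [pvAStep]
      have hruns : pvRunsC c b (x :: xs) =
          PySem.Str.join "\n" c :: pvRunsC [x] (pvIsTable x) xs := by
        have hne : (pvIsTable x == b) = false := by simp [hxb]
        simp only [pvRunsC, List.takeWhile_cons, List.dropWhile_cons, hne,
          Bool.false_eq_true, if_false]
        rw [pvRuns_cons]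
        simp
      rw [List.foldl_cons, hstep, ih _ [x] (pvIsTable x) (by simp), hruns]
      simp [pvRunsC, pvEmitLast]

lemma pvA_eq_emitLast (lines : List String) :
    pvAFinalize (lines.foldl pvAStep ([], [], false)) = pvEmitLast (pvRuns lines) := by
  cases lines with
  | nil => simp [pvAFinalize, pvRuns_nil, pvEmitLast]
  | cons x xs =>
    have hstep : pvAStep ([], [], false) x = ([], [x], pvIsTable x) := by
      cases hx : pvIsTable x <;> simp [pvAStep, hx]
    rw [List.foldl_cons, hstep, pvLoop xs [] [x] (pvIsTable x) (by simp), pvRuns_cons]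
    simp [pvRunsC]

-- ===== VERDICT (by name: the statement is the Claim_ definition above) =====
theorem split_table_sections_py_spec : Claim_equal_split_table_sections_py := by
  intro markdown _
  unfold Spec_split_table_sections_py split_table_sections_py split_table_sections_py_alt
  rw [pvA_eq_emitLast, pvAlt_eq_emitLast]
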